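-- pv_equiv track=rewrite | github.com/kenenisa/CompetitiveProgramming | Contest/D_Mahmoud_and_a_Triangle.py | the
-- ===== SOURCE A (Python) =====
-- def the(n,nums):
--     for i in range(n - 1, 0, -1):
--         l = 0
--         r = i - 1
--         while(l < r):
--             if nums[l] + nums[r] > nums[i]:
--                 return "YES"
--             l += 1
--     return "NO"
-- ===== SOURCE B (Python) =====
-- def the(n, nums):
--     # Single pass: keep the running maximum of nums[0..i-2]; since the inner
--     # scan of A only asks whether SOME earlier element beats the bound, the
--     # prefix maximum answers it in one comparison per step.
--     if n < 3:
--         return "NO"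
--     pm = nums[0]
--     for i in range(2, n):
--         if pm + nums[i - 1] > nums[i]:
--             return "YES"
--         pm = max(pm, nums[i - 1])
--     return "NO"
-- ===== Notes on version B (the rewrite author's own statement) =====
-- stated objective: alternative
-- what changed: Replaces A's nested scan (for each i, rescan all earlier indices l testing nums[l]+nums[i-1]>nums[i]) by a single forward pass maintaining the prefix maximum of nums[0..i-2], testing prefix_max+nums[i-1]>nums[i] once per i (O(n) worst case instead of O(n^2); on typical random inputs both early-exit, so a timing run saw no gap).
import Mathlib
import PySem

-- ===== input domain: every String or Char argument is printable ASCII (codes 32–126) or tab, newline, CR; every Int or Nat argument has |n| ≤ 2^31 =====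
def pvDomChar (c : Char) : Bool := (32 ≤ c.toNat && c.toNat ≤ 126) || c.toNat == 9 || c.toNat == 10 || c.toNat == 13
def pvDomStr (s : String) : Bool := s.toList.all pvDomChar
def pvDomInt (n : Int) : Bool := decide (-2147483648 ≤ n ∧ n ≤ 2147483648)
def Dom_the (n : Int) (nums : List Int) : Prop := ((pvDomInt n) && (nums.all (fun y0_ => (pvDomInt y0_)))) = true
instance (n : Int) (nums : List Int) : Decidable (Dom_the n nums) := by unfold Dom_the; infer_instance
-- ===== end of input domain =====

-- B replaces A's nested rescans by a single pass keeping the prefix maximum of the earlier elements (a different, linear-scan algorithm).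


-- ===== PORT A =====
-- inner 'while l < r' loop of A (returns true iff A would return "YES" at this i)
def theInner (nums : List Int) (i l r : Int) : Bool :=
  if _h : l < r then
    if PySem.List.pyGetD nums l 0 + PySem.List.pyGetD nums r 0 > PySem.List.pyGetD nums i 0 then
      true
    else theInner nums i (l + 1) r
  else false
termination_by (r - l).toNat
decreasing_by omega

def the (n : Int) (nums : List Int) : String :=
  if (PySem.List.pyRange (n - 1) 0 (-1)).any (fun i => theInner nums i 0 (i - 1)) then "YES"
  else "NO"

-- ===== PORT B =====
-- the single pass of B over range(2, n), carrying the prefix maximum pm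
def theAltGo (nums : List Int) (pm : Int) : List Int → String
  | [] => "NO"
  | i :: rest =>
    if pm + PySem.List.pyGetD nums (i - 1) 0 > PySem.List.pyGetD nums i 0 then "YES"
    else theAltGo nums (max pm (PySem.List.pyGetD nums (i - 1) 0)) rest

def the_alt (n : Int) (nums : List Int) : String :=
  if n < 3 then "NO"
  else theAltGo nums (PySem.List.pyGetD nums 0 0) (PySem.List.pyRange 2 n 1)

-- ===== PRECONDITION & SPEC =====
-- A raises IndexError when n ≥ 3 and the list is shorter than n; those inputs are excluded.
def Pre_the (n : Int) (nums : List Int) : Prop := 3 ≤ n → n ≤ (nums.length : Int)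
instance (n : Int) (nums : List Int) : Decidable (Pre_the n nums) := by unfold Pre_the; infer_instance
def pvWitness_the : Int × List Int := (4, [1, 2, 3, 4])

def Spec_the (n : Int) (nums : List Int) (out : String) : Prop := out = the_alt n nums
instance (n : Int) (nums : List Int) (out : String) : Decidable (Spec_the n nums out) := by unfold Spec_the; infer_instance

-- ===== CLAIM (what is proved, stated in full; the proofs are below) =====
def Claim_equal_the : Prop := ∀ (n : Int) (nums : List Int), Dom_the n nums → Pre_the n nums → Spec_the n nums (the n nums)

-- ===== LEMMAS AND PROOFS =====

-- the condition "some earlier pair beats nums[i]" that both programs decide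
def AP (nums : List Int) (i : Int) : Prop :=
  ∃ l : Int, 0 ≤ l ∧ l < i - 1 ∧
    PySem.List.pyGetD nums l 0 + PySem.List.pyGetD nums (i - 1) 0 > PySem.List.pyGetD nums i 0

theorem theInner_eq_true (nums : List Int) (i l r : Int) :
    theInner nums i l r = true ↔
      ∃ t : Int, l ≤ t ∧ t < r ∧
        PySem.List.pyGetD nums t 0 + PySem.List.pyGetD nums r 0 > PySem.List.pyGetD nums i 0 := by
  fun_induction theInner nums i l r with
  | case1 l hlr hc =>
      simp only [true_iff]
      exact ⟨l, le_refl l, hlr, hc⟩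
  | case2 l hlr hc ih =>
      simp only [ih]
      constructor
      · rintro ⟨t, h1, h2, h3⟩; exact ⟨t, by omega, h2, h3⟩
      · rintro ⟨t, h1, h2, h3⟩
        refine ⟨t, ?_, h2, h3⟩
        rcases lt_or_ge l t with h | h
        · omega
        · exfalso; have : t = l := by omega
          subst this; exact absurd h3 hc
  | case3 l hlr =>
      simp only [Bool.false_eq_true, false_iff]
      rintro ⟨t, h1, h2, _⟩; omega

theorem the_eq_yes (n : Int) (nums : List Int) :
    the n nums = "YES" ↔ ∃ i : Int, 2 ≤ i ∧ i < n ∧ AP nums i := by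
  unfold the
  split
  · rename_i h
    simp only [true_iff]
    rw [List.any_eq_true] at h
    obtain ⟨i, hmem, hinner⟩ := h
    rw [PySem.List.mem_pyRange_neg_one] at hmem
    rw [theInner_eq_true] at hinner
    obtain ⟨t, h1, h2, h3⟩ := hinner
    exact ⟨i, by omega, by omega, ⟨t, h1, h2, h3⟩⟩
  · rename_i h
    simp only [List.any_eq_true, not_exists] at h
    constructor
    · intro hne; simp at hne
    · rintro ⟨i, h2i, hin, ⟨t, h1, h2, h3⟩⟩
      exfalso
      refine h i ⟨?_, ?_⟩
      · rw [PySem.List.mem_pyRange_neg_one]; omega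
      · rw [theInner_eq_true]; exact ⟨t, h1, h2, h3⟩

theorem theAltGo_yes_or_no (nums : List Int) (pm : Int) (is : List Int) :
    theAltGo nums pm is = "YES" ∨ theAltGo nums pm is = "NO" := by
  induction is generalizing pm with
  | nil => right; rfl
  | cons i rest ih =>
      unfold theAltGo
      split
      · left; rfl
      · exact ih _

-- loop invariant: pm is the maximum of nums[0..j-2] (attained and an upper bound)
theorem theAltGo_spec (nums : List Int) (n : Int) :
    ∀ (k : Nat) (j pm : Int), (n - j).toNat = k → 2 ≤ j →
    (∀ l : Int, 0 ≤ l → l < j - 1 → PySem.List.pyGetD nums l 0 ≤ pm) →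
    (∃ l : Int, 0 ≤ l ∧ l < j - 1 ∧ PySem.List.pyGetD nums l 0 = pm) →
    (theAltGo nums pm (PySem.List.pyRange j n 1) = "YES" ↔
      ∃ i : Int, j ≤ i ∧ i < n ∧ AP nums i) := by
  intro k
  induction k with
  | zero =>
      intro j pm hk _ _ _
      rw [PySem.List.pyRange_one_eq_nil (by omega)]
      simp only [theAltGo, String.reduceEq, false_iff, not_exists]
      rintro i ⟨h1, h2, _⟩; omega
  | succ k ih =>
      intro j pm hk hj hub hatt
      have hjn : j < n := by omega
      rw [PySem.List.pyRange_one_cons hjn]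
      unfold theAltGo
      split
      · rename_i hc
        simp only [true_iff]
        obtain ⟨l, hl0, hl1, hleq⟩ := hatt
        exact ⟨j, le_refl j, hjn, ⟨l, hl0, hl1, by omega⟩⟩
      · rename_i hc
        push Not at hc
        rw [ih (j + 1) (max pm (PySem.List.pyGetD nums (j - 1) 0)) (by omega) (by omega)
              (by intro l hl0 hl1
                  rcases lt_or_ge l (j - 1) with h | h
                  · exact le_trans (hub l hl0 h) (le_max_left _ _)
                  · have : l = j - 1 := by omega
                    subst this; exact le_max_right _ _)
              (by rcases max_choice pm (PySem.List.pyGetD nums (j - 1) 0) with h | h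
                  · obtain ⟨l, hl0, hl1, hleq⟩ := hatt
                    exact ⟨l, hl0, by omega, by omega⟩
                  · exact ⟨j - 1, by omega, by omega, h.symm⟩)]
        constructor
        · rintro ⟨i, h1, h2, hap⟩; exact ⟨i, by omega, h2, hap⟩
        · rintro ⟨i, h1, h2, hap⟩
          rcases lt_or_ge j i with h | h
          · exact ⟨i, by omega, h2, hap⟩
          · exfalso
            have : i = j := by omega
            subst this
            obtain ⟨l, hl0, hl1, hl3⟩ := hap
            have := hub l hl0 hl1
            omega

theorem the_alt_eq_yes (n : Int) (nums : List Int) :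
    the_alt n nums = "YES" ↔ ∃ i : Int, 2 ≤ i ∧ i < n ∧ AP nums i := by
  unfold the_alt
  split
  · rename_i h
    simp only [String.reduceEq, false_iff, not_exists]
    rintro i ⟨h1, h2, _⟩; omega
  · rename_i h
    push Not at h
    exact theAltGo_spec nums n (n - 2).toNat 2 (PySem.List.pyGetD nums 0 0) rfl (le_refl 2)
      (by intro l hl0 hl1
          have : l = 0 := by omega
          subst this; exact le_refl _)
      ⟨0, le_refl 0, by omega, rfl⟩

theorem the_alt_yes_or_no (n : Int) (nums : List Int) :
    the_alt n nums = "YES" ∨ the_alt n nums = "NO" := by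
  unfold the_alt
  split
  · right; rfl
  · exact theAltGo_yes_or_no _ _ _

-- ===== VERDICT (by name: the statement is the Claim_ definition above) =====
theorem the_spec : Claim_equal_the := by
  intro n nums _hdom _hpre
  unfold Spec_the
  by_cases hP : ∃ i : Int, 2 ≤ i ∧ i < n ∧ AP nums i
  · rw [(the_eq_yes n nums).mpr hP, ((the_alt_eq_yes n nums).mpr hP).symm]
  · have ha : the n nums = "NO" := by
      unfold the
      split
      · rename_i h
        exact absurd ((the_eq_yes n nums).mp (by unfold the; simp [h])) hP
      · rfl
    have hb : the_alt n nums = "NO" := by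
      rcases the_alt_yes_or_no n nums with h | h
      · exact absurd ((the_alt_eq_yes n nums).mp h) hP
      · exact h
    rw [ha, hb]
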